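-- pv_equiv track=rewrite | github.com/jonasrohw/swiftsolve | src/swiftsolve/datasets/parse_codeforces.py | _infer_approach
-- ===== SOURCE A (Python) =====
-- from typing import List, Dict, Any, Optional
--
-- def _infer_approach(tags: List[str]) -> str:
--     """Infer expected algorithmic approach from tags."""
--     if not tags:
--         return "implementation"
--
--     # Priority order for approach selection
--     priority_tags = [
--         'dp', 'graphs', 'binary search', 'two pointers',
--         'greedy', 'math', 'implementation'
--     ]
--
--     for tag in priority_tags:
--         if tag in tags:
--             return tag
--
--     return tags[0]  # First tag as fallback
-- ===== SOURCE B (Python) =====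
-- def _infer_approach(tags):
--     """Infer expected algorithmic approach from tags."""
--     if not tags:
--         return "implementation"
--
--     priority_tags = [
--         'dp', 'graphs', 'binary search', 'two pointers',
--         'greedy', 'math', 'implementation'
--     ]
--     rank = {t: i for i, t in enumerate(priority_tags)}
--
--     best_tag = None
--     best_rank = len(priority_tags)
--     for t in tags:
--         r = rank.get(t)
--         if r is not None and r < best_rank:
--             best_rank = r
--             best_tag = t
--     return best_tag if best_tag is not None else tags[0]
-- ===== Notes on version B (the rewrite author's own statement) =====
-- stated objective: alternative
-- what changed: Replaces A's short-circuit scan over the fixed priority list (membership test in tags at each step) with a rank dictionary built once from the priority list and a single running-minimum pass over the input tags, falling back to tags[0] when no tag has a rank.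
import Mathlib
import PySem

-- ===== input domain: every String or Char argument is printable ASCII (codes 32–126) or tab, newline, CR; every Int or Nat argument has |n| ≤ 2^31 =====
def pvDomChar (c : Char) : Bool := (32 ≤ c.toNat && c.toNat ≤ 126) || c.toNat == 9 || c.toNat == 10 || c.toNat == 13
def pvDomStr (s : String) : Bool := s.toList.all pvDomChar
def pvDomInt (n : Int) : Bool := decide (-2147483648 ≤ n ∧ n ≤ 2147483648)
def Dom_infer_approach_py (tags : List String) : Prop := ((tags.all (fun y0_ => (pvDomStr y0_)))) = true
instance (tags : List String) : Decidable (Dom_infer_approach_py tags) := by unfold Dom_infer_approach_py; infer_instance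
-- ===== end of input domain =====

set_option maxRecDepth 4000


-- B replaces A's short-circuit scan over the fixed priority list with a rank table and a
-- single running-minimum pass over the input tags (objective: alternative structure, same cost).

-- ===== PORT A =====
-- for tag in priority_tags: if tag in tags: return tag   → find? over the literal priority list
def infer_approach_py (tags : List String) : String :=
  match tags with
  | [] => "implementation"
  | h :: _ =>
    match (["dp", "graphs", "binary search", "two pointers",
            "greedy", "math", "implementation"]).find? (fun tag => tags.contains tag) with
    | some tag => tag
    | none => h  -- tags[0]

-- ===== PORT B =====
def altPriority : List String :=
  ["dp", "graphs", "binary search", "two pointers", "greedy", "math", "implementation"]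

-- rank = {t: i for i, t in enumerate(priority_tags)}
def altRank : PySem.Dict String Int :=
  PySem.Dict.ofList (altPriority.zipIdx.map (fun p => (p.1, (p.2 : Int))))

def infer_approach_py_alt (tags : List String) : String :=
  match tags with
  | [] => "implementation"
  | h :: _ =>
    -- for t in tags: r = rank.get(t); if r is not None and r < best_rank: update
    let st : Option String × Int := tags.foldl
      (fun (s : Option String × Int) t =>
        match altRank.get? t with
        | some r => if r < s.2 then (some t, r) else s
        | none => s)
      (none, 7)
    match st.1 with
    | some bt => bt
    | none => h  -- tags[0]

-- ===== PRECONDITION & SPEC =====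
def Spec_infer_approach_py (tags : List String) (out : String) : Prop := out = infer_approach_py_alt tags
instance (tags : List String) (out : String) : Decidable (Spec_infer_approach_py tags out) := by unfold Spec_infer_approach_py; infer_instance

-- ===== CLAIM (what is proved, stated in full; the proofs are below) =====
def Claim_equal_infer_approach_py : Prop := ∀ (tags : List String), Dom_infer_approach_py tags → Spec_infer_approach_py tags (infer_approach_py tags)

-- ===== LEMMAS AND PROOFS =====

-- rank of a single tag, 7 when absent
def rkOf (t : String) : Int := (altRank.get? t).getD 7

-- minimum rank occurring in tags (7 if none of the priority tags occurs)
def M : List String → Int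
  | [] => 7
  | t :: r => min (rkOf t) (M r)

-- the priority tag having a given rank
def Rof (m : Int) : Option String :=
  if m = 0 then some "dp" else if m = 1 then some "graphs" else
  if m = 2 then some "binary search" else if m = 3 then some "two pointers" else
  if m = 4 then some "greedy" else if m = 5 then some "math" else
  if m = 6 then some "implementation" else none

lemma rank_eq (t : String) : altRank.get? t =
    if "dp" == t then some 0 else if "graphs" == t then some 1 else
    if "binary search" == t then some 2 else if "two pointers" == t then some 3 else
    if "greedy" == t then some 4 else if "math" == t then some 5 else
    if "implementation" == t then some 6 else none := by
  rw [show altRank = PySem.Dict.mk [("dp",0),("graphs",1),("binary search",2),("two pointers",3),("greedy",4),("math",5),("implementation",6)] from rfl]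
  simp only [PySem.Dict.get?_mk_cons]
  rfl

lemma rank_some (t : String) (r : Int) (h : altRank.get? t = some r) :
    Rof r = some t ∧ 0 ≤ r ∧ r ≤ 6 := by
  rw [rank_eq] at h
  split_ifs at h <;>
    first
    | exact Option.noConfusion h
    | (injection h with h; subst h
       refine ⟨by simp_all [Rof], by norm_num, by norm_num⟩)

lemma M_le (tags : List String) : M tags ≤ 7 := by
  induction tags with
  | nil => simp [M]
  | cons t r ih => simp [M]; omega

lemma M_formula (tags : List String) : M tags =
    if tags.contains "dp" then 0 else if tags.contains "graphs" then 1 else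
    if tags.contains "binary search" then 2 else if tags.contains "two pointers" then 3 else
    if tags.contains "greedy" then 4 else if tags.contains "math" then 5 else
    if tags.contains "implementation" then 6 else 7 := by
  induction tags with
  | nil => simp [M]
  | cons t rest ih =>
    by_cases e1 : t = "dp"
    · subst e1; simp [M, rkOf, rank_eq, ih]; split_ifs <;> omega
    by_cases e2 : t = "graphs"
    · subst e2; simp [M, rkOf, rank_eq, ih]; split_ifs <;> omega
    by_cases e3 : t = "binary search"
    · subst e3; simp [M, rkOf, rank_eq, ih]; split_ifs <;> omega
    by_cases e4 : t = "two pointers"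
    · subst e4; simp [M, rkOf, rank_eq, ih]; split_ifs <;> omega
    by_cases e5 : t = "greedy"
    · subst e5; simp [M, rkOf, rank_eq, ih]; split_ifs <;> omega
    by_cases e6 : t = "math"
    · subst e6; simp [M, rkOf, rank_eq, ih]; split_ifs <;> omega
    by_cases e7 : t = "implementation"
    · subst e7; simp [M, rkOf, rank_eq, ih]; split_ifs <;> omega
    · simp [M, rkOf, rank_eq, List.contains_cons, ih, beq_iff_eq,
        Ne.symm e1, Ne.symm e2, Ne.symm e3, Ne.symm e4, Ne.symm e5, Ne.symm e6, Ne.symm e7, e7]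
      split_ifs <;> omega

-- B's loop invariant: the state is determined by the best rank so far
lemma loop_spec (tags : List String) : ∀ (br : Int), br ≤ 7 →
    tags.foldl
      (fun (s : Option String × Int) t =>
        match altRank.get? t with
        | some r => if r < s.2 then (some t, r) else s
        | none => s)
      (Rof br, br) = (Rof (min br (M tags)), min br (M tags)) := by
  induction tags with
  | nil =>
    intro br hbr
    have : min br (7:Int) = br := by omega
    simp [M, this]
  | cons t rest ih =>
    intro br hbr
    rw [List.foldl_cons]
    rcases hg : altRank.get? t with _ | r
    · -- tag without rank: state unchanged
      have hk : rkOf t = 7 := by simp [rkOf, hg]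
      have hMr : M rest ≤ 7 := M_le rest
      have : min br (M rest) = min br (M (t :: rest)) := by
        simp [M, hk]; omega
      rw [ih br hbr, this]
    · obtain ⟨hrof, hr0, hr6⟩ := rank_some t r hg
      have hk : rkOf t = r := by simp [rkOf, hg]
      show List.foldl _ (if r < br then (some t, r) else (Rof br, br)) rest = _
      by_cases hlt : r < br
      · rw [if_pos hlt, ← hrof, ih r (by omega)]
        have : min r (M rest) = min br (M (t :: rest)) := by
          simp [M, hk]; omega
        rw [this]
      · rw [if_neg hlt, ih br hbr]
        have : min br (M rest) = min br (M (t :: rest)) := by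
          simp [M, hk]; omega
        rw [this]

lemma A_spec (h : String) (rest : List String) :
    infer_approach_py (h :: rest) =
      match Rof (M (h :: rest)) with
      | some t => t
      | none => h := by
  rw [M_formula]
  show (match (["dp", "graphs", "binary search", "two pointers",
            "greedy", "math", "implementation"]).find? (fun tag => (h :: rest).contains tag) with
    | some tag => tag
    | none => h) = _
  simp only [List.find?]
  split_ifs <;> simp_all [Rof]

-- ===== VERDICT (by name: the statement is the Claim_ definition above) =====
theorem infer_approach_py_spec : Claim_equal_infer_approach_py := by
  intro tags _
  unfold Spec_infer_approach_py
  cases tags with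
  | nil => rfl
  | cons h rest =>
    rw [A_spec]
    show _ = infer_approach_py_alt (h :: rest)
    unfold infer_approach_py_alt
    have hinit : ((none : Option String), (7 : Int)) = (Rof 7, (7 : Int)) := by
      norm_num [Rof]
    rw [hinit, loop_spec (h :: rest) 7 (le_refl _)]
    have h7 : min (7:Int) (M (h :: rest)) = M (h :: rest) := by
      have := M_le (h :: rest); omega
    rw [h7]
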